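-- pv_equiv track=rewrite | github.com/dizwe/fitter-algorithm | data_to_size_top.py | guess_upper_size
-- ===== SOURCE A (Python) =====
-- def guess_upper_size(num, data):
--     """0-어깨 1-가슴 2-팔 3-허리"""
--     func_list = ['height', 'shoulder', 'chest', 'arm', 'waist']
--     criteria_list = {
--         'shoulder' : [395, 410, 425, 440, 460, 480, 500], # 애매 기준
--         'chest' : [840, 850, 930, 1010, 1080, 1200, 1280],
--         'arm' : [560, 565, 585, 600, 615, 625, 625], # 애매 기준
--         'waist' : [720, 760, 840, 920, 1000, 1080, 1160],
--         'height': [1650, 1650, 1750, 2000, 2100, 2100, 2100], # 일단 작은걸로 되개 하자.2000은 그냥 의미없음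
--     }
--     size_names = ["XS", "S", "M", "L", "XL", "XXL", "XXXL"]
--
--     def guess(criterias):
--         for criteria, name in zip(criterias, size_names):
--             if data <= criteria:
--                 return name
--         return size_names[-1]#엄청 크면 제일큰 사이즈로
--
--     return guess(criteria_list[func_list[num]])
-- ===== SOURCE B (Python) =====
-- def guess_upper_size(num, data):
--     """0-어깨 1-가슴 2-팔 3-허리"""
--     func_list = ['height', 'shoulder', 'chest', 'arm', 'waist']
--     criteria_list = {
--         'shoulder': [395, 410, 425, 440, 460, 480, 500],
--         'chest': [840, 850, 930, 1010, 1080, 1200, 1280],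
--         'arm': [560, 565, 585, 600, 615, 625, 625],
--         'waist': [720, 760, 840, 920, 1000, 1080, 1160],
--         'height': [1650, 1650, 1750, 2000, 2100, 2100, 2100],
--     }
--     size_names = ["XS", "S", "M", "L", "XL", "XXL", "XXXL"]
--
--     arr = criteria_list[func_list[num]]
--     lo, hi = 0, len(arr)
--     while lo < hi:
--         mid = (lo + hi) // 2
--         if arr[mid] < data:
--             lo = mid + 1
--         else:
--             hi = mid
--     return size_names[min(lo, len(size_names) - 1)]
-- ===== Notes on version B (the rewrite author's own statement) =====
-- stated objective: alternative
-- what changed: Replaces the left-to-right zip scan over thresholds with a hand-written binary search (bisect_left) over the sorted threshold array, returning size_names[min(lo, 6)] so 'larger than all' clamps to the last size.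
import Mathlib
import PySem

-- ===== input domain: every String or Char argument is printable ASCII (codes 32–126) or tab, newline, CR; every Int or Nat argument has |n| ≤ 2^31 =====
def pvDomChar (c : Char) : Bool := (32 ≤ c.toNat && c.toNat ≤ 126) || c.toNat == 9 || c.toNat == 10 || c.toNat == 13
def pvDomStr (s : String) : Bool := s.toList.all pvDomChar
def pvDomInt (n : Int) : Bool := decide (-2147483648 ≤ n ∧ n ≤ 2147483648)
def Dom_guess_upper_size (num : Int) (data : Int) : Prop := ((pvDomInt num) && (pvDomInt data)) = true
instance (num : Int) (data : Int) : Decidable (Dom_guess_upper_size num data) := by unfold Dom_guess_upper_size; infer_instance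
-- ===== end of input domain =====

-- B replaces A's left-to-right scan of the thresholds with a hand-written binary search
-- (bisect_left) plus an index clamp; equivalence is proved for every in-range measurement index.

-- ===== PORT A =====
def pvFuncList : List String := ["height", "shoulder", "chest", "arm", "waist"]

def pvCriteriaList : PySem.Dict String (List Int) := PySem.Dict.ofList
  [("shoulder", [395, 410, 425, 440, 460, 480, 500]),
   ("chest",    [840, 850, 930, 1010, 1080, 1200, 1280]),
   ("arm",      [560, 565, 585, 600, 615, 625, 625]),
   ("waist",    [720, 760, 840, 920, 1000, 1080, 1160]),
   ("height",   [1650, 1650, 1750, 2000, 2100, 2100, 2100])]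

def pvSizeNames : List String := ["XS", "S", "M", "L", "XL", "XXL", "XXXL"]

-- the inner `guess` loop: first name whose criteria is ≥ data, else size_names[-1]
def pvGuessLoop (data : Int) : List (Int × String) → String
  | [] => match PySem.List.pyGet? pvSizeNames (-1) with
          | some s => s
          | none => ""   -- unreachable: pvSizeNames is non-empty
  | (criteria, name) :: rest => if data ≤ criteria then name else pvGuessLoop data rest

def guess_upper_size (num : Int) (data : Int) : String :=
  match PySem.List.pyGet? pvFuncList num with
  | none => ""   -- IndexError: excluded by Pre_
  | some key =>
    match PySem.Dict.get? pvCriteriaList key with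
    | none => ""   -- KeyError: unreachable, every func_list entry is a key
    | some criterias => pvGuessLoop data (criterias.zip pvSizeNames)

-- ===== PORT B =====
-- the while-loop of Source B's hand-written bisect_left; fuel bounds the number of iterations
def pvBisectGo (arr : List Int) (data : Int) : Nat → Nat → Nat → Nat
  | 0, lo, _ => lo
  | fuel + 1, lo, hi =>
    if lo < hi then
      let mid := (lo + hi) / 2
      if arr.getD mid 0 < data then pvBisectGo arr data fuel (mid + 1) hi
      else pvBisectGo arr data fuel lo mid
    else lo

def guess_upper_size_alt (num : Int) (data : Int) : String :=
  match PySem.List.pyGet? pvFuncList num with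
  | none => ""
  | some key =>
    match PySem.Dict.get? pvCriteriaList key with
    | none => ""
    | some arr =>
      let lo := pvBisectGo arr data (arr.length + 1) 0 arr.length
      pvSizeNames.getD (min lo (pvSizeNames.length - 1)) ""

-- ===== PRECONDITION & SPEC =====
-- Pre_ excludes exactly the inputs where A raises IndexError (num outside the 5-entry func_list)
def Pre_guess_upper_size (num : Int) (data : Int) : Prop := -5 ≤ num ∧ num < 5
instance (num : Int) (data : Int) : Decidable (Pre_guess_upper_size num data) := by unfold Pre_guess_upper_size; infer_instance
def pvWitness_guess_upper_size : Int × Int := (1, 420)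

def Spec_guess_upper_size (num : Int) (data : Int) (out : String) : Prop := out = guess_upper_size_alt num data
instance (num : Int) (data : Int) (out : String) : Decidable (Spec_guess_upper_size num data out) := by unfold Spec_guess_upper_size; infer_instance

-- ===== CLAIM (what is proved, stated in full; the proofs are below) =====
def Claim_equal_guess_upper_size : Prop := ∀ (num : Int) (data : Int), Dom_guess_upper_size num data → Pre_guess_upper_size num data → Spec_guess_upper_size num data (guess_upper_size num data)

-- ===== LEMMAS AND PROOFS =====

-- getD is monotone along a (· ≤ ·)-pairwise list
theorem pv_sorted_getD (arr : List Int) (hs : List.Pairwise (· ≤ ·) arr) :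
    ∀ i j, i ≤ j → j < arr.length → arr.getD i 0 ≤ arr.getD j 0 := by
  induction arr with
  | nil => intro i j _ hj; simp at hj
  | cons a t ih =>
    rcases List.pairwise_cons.mp hs with ⟨ha, ht⟩
    intro i j hij hj
    cases i with
    | zero =>
      cases j with
      | zero => simp
      | succ j =>
        simp only [List.getD_cons_zero, List.getD_cons_succ]
        have hjl : j < t.length := by simpa using hj
        have : t.getD j 0 ∈ t := by
          rw [List.getD_eq_getElem _ _ hjl]; exact List.getElem_mem hjl
        exact ha _ this
    | succ i =>
      cases j with
      | zero => omega
      | succ j =>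
        simp only [List.getD_cons_succ]
        exact ih ht i j (by omega) (by simpa using hj)

-- the length of takeWhile is the unique boundary index
theorem pv_takeWhile_len (p : Int → Bool) :
    ∀ (arr : List Int) (j : Nat), j ≤ arr.length →
      (∀ i, i < j → p (arr.getD i 0) = true) →
      (∀ i, j ≤ i → i < arr.length → ¬ p (arr.getD i 0) = true) →
      (arr.takeWhile p).length = j := by
  intro arr
  induction arr with
  | nil => intro j hj _ _; simp at hj ⊢; omega
  | cons a t ih =>
    intro j hj hlt hge
    cases j with
    | zero =>
      have : ¬ p a = true := by
        have := hge 0 (by omega) (by simp)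
        simpa using this
      simp [this]
    | succ j =>
      have hpa : p a = true := by simpa using hlt 0 (by omega)
      have : (t.takeWhile p).length = j := by
        refine ih j (by simpa using hj) ?_ ?_
        · intro i hi; simpa using hlt (i + 1) (by omega)
        · intro i hi hil; simpa using hge (i + 1) (by omega) (by simpa using hil)
      simp [hpa, this]

-- the binary search returns the boundary index of (· < data) on a sorted array
theorem pv_bisect_eq (arr : List Int) (data : Int) (hs : List.Pairwise (· ≤ ·) arr) :
    ∀ (fuel lo hi : Nat), lo ≤ hi → hi ≤ arr.length → hi - lo ≤ fuel →
      (∀ i, i < lo → decide (arr.getD i 0 < data) = true) →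
      (∀ i, hi ≤ i → i < arr.length → ¬ decide (arr.getD i 0 < data) = true) →
      pvBisectGo arr data fuel lo hi = (arr.takeWhile (fun a => decide (a < data))).length := by
  intro fuel
  induction fuel with
  | zero =>
    intro lo hi h1 h2 h3 hlt hge
    have : lo = hi := by omega
    subst this
    exact (pv_takeWhile_len _ arr lo (by omega) hlt hge).symm
  | succ fuel ih =>
    intro lo hi h1 h2 h3 hlt hge
    by_cases hlh : lo < hi
    · have hmid1 : lo ≤ (lo + hi) / 2 := by omega
      have hmid2 : (lo + hi) / 2 < hi := by omega
      by_cases hc : arr.getD ((lo + hi) / 2) 0 < data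
      · have : pvBisectGo arr data (fuel + 1) lo hi
            = pvBisectGo arr data fuel ((lo + hi) / 2 + 1) hi := by
          simp only [pvBisectGo, if_pos hlh, if_pos hc]
        rw [this]
        refine ih ((lo + hi) / 2 + 1) hi (by omega) h2 (by omega) ?_ hge
        intro i hi'
        by_cases hil : i < lo
        · exact hlt i hil
        · have : arr.getD i 0 ≤ arr.getD ((lo + hi) / 2) 0 :=
            pv_sorted_getD arr hs i _ (by omega) (by omega)
          simp only [decide_eq_true_eq]; omega
      · have : pvBisectGo arr data (fuel + 1) lo hi
            = pvBisectGo arr data fuel lo ((lo + hi) / 2) := by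
          simp only [pvBisectGo, if_pos hlh, if_neg hc]
        rw [this]
        refine ih lo ((lo + hi) / 2) (by omega) (by omega) (by omega) hlt ?_
        intro i hi' hil
        by_cases hih : hi ≤ i
        · exact hge i hih hil
        · have : arr.getD ((lo + hi) / 2) 0 ≤ arr.getD i 0 :=
            pv_sorted_getD arr hs _ i (by omega) hil
          simp only [decide_eq_true_eq]; omega
    · have hle : lo = hi := by omega
      have : pvBisectGo arr data (fuel + 1) lo hi = lo := by
        simp only [pvBisectGo, if_neg hlh]
      rw [this, hle]
      exact (pv_takeWhile_len _ arr hi (by omega) (hle ▸ hlt) hge).symm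

-- A's scan returns the name at the boundary index, or size_names[-1] past the end
theorem pv_scan_eq (data : Int) :
    ∀ (arr : List Int) (names : List String), arr.length = names.length →
      pvGuessLoop data (arr.zip names) =
        (if (arr.takeWhile (fun a => decide (a < data))).length < names.length
         then names.getD (arr.takeWhile (fun a => decide (a < data))).length ""
         else "XXXL") := by
  intro arr
  induction arr with
  | nil =>
    intro names hlen
    have : names = [] := by
      cases names with
      | nil => rfl
      | cons n t => simp at hlen
    subst this
    simp [pvGuessLoop]
    rfl
  | cons a t ih =>
    intro names hlen
    cases names with
    | nil => simp at hlen
    | cons n ns =>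
      by_cases h : data ≤ a
      · have hp : decide (a < data) = false := by simp; omega
        simp [pvGuessLoop, List.zip, hp, if_pos h]
      · have hp : decide (a < data) = true := by simp; omega
        have hlen' : t.length = ns.length := by simpa using hlen
        simp only [List.zip, List.zipWith_cons_cons, pvGuessLoop, if_neg h,
          List.takeWhile_cons, hp, List.length_cons, if_true]
        rw [show (t.zipWith Prod.mk ns) = t.zip ns from rfl, ih ns hlen']
        by_cases hlt : (t.takeWhile (fun a => decide (a < data))).length < ns.length
        · rw [if_pos hlt, if_pos (by omega)]
          simp [List.getD_cons_succ]
        · rw [if_neg hlt, if_neg (by omega)]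

-- combined: for a sorted 7-element threshold array both implementations agree for every data
theorem pv_agree (arr : List Int) (h7 : arr.length = 7)
    (hs : List.Pairwise (· ≤ ·) arr) (data : Int) :
    pvGuessLoop data (arr.zip pvSizeNames) =
      pvSizeNames.getD (min (pvBisectGo arr data (arr.length + 1) 0 arr.length)
        (pvSizeNames.length - 1)) "" := by
  have hnames : pvSizeNames.length = 7 := by rfl
  rw [pv_bisect_eq arr data hs (arr.length + 1) 0 arr.length (by omega) (by omega)
      (by omega) (by intro i hi; omega) (by intro i h1 h2; omega)]
  rw [pv_scan_eq data arr pvSizeNames (by rw [h7, hnames])]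
  set k := (arr.takeWhile (fun a => decide (a < data))).length with hk
  have hkle : k ≤ 7 := by
    have := (List.takeWhile_sublist (l := arr) (p := fun a => decide (a < data))).length_le
    omega
  rw [hnames]
  by_cases hlt : k < 7
  · rw [if_pos hlt]
    have : min k (7 - 1) = k := by omega
    rw [this]
  · rw [if_neg hlt]
    have hk7 : k = 7 := by omega
    have : min k (7 - 1) = 6 := by omega
    rw [this]
    rfl

-- ===== VERDICT (by name: the statement is the Claim_ definition above) =====
theorem guess_upper_size_spec : Claim_equal_guess_upper_size := by
  intro num data _hdom hpre
  unfold Spec_guess_upper_size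
  obtain ⟨h1, h2⟩ := hpre
  interval_cases num <;>
  · show pvGuessLoop data _ = pvSizeNames.getD _ ""
    exact pv_agree _ (by rfl) (by decide) data
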